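-- pv_equiv track=rewrite | github.com/ramabhadrarao/route_analytics_pro | utils/pdf_generator.py | calculate_safety_score
-- ===== SOURCE A (Python) =====
-- def calculate_safety_score(sharp_turns, dead_zones_count, poor_zones_count):
--     """Calculate safety score"""
--     base_score = 100
--
--     if not sharp_turns:
--         return base_score
--
--     blind_spots = len([t for t in sharp_turns if t.get('angle', 0) > 80])
--     sharp_danger = len([t for t in sharp_turns if 70 <= t.get('angle', 0) <= 80])
--     moderate_turns = len([t for t in sharp_turns if 45 <= t.get('angle', 0) < 70])
--
--     base_score -= blind_spots * 15
--     base_score -= sharp_danger * 10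
--     base_score -= moderate_turns * 5
--     base_score -= dead_zones_count * 8
--     base_score -= poor_zones_count * 4
--
--     return max(0, min(100, base_score))
-- ===== SOURCE B (Python) =====
-- def calculate_safety_score(sharp_turns, dead_zones_count, poor_zones_count):
--     # Histogram of angles, then one weighted pass over the DISTINCT angles.
--     hist = {}
--     for t in sharp_turns:
--         a = t.get('angle', 0)
--         hist[a] = hist.get(a, 0) + 1
--     penalty = 0
--     for a, n in hist.items():
--         if a > 80:
--             penalty += 15 * n
--         elif a >= 70:
--             penalty += 10 * n
--         elif a >= 45:
--             penalty += 5 * n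
--     score = 100 - penalty - 8 * dead_zones_count - 4 * poor_zones_count
--     return max(0, min(100, score))
-- ===== Notes on version B (the rewrite author's own statement) =====
-- stated objective: alternative
-- what changed: A filters sharp_turns three times and multiplies bucket counts; B builds a histogram dict of the distinct angles in one pass and then charges each distinct angle's penalty weight times its multiplicity in a pass over the histogram items, applying zone penalties unconditionally.
-- intended difference: On empty sharp_turns with 2*dead_zones_count+poor_zones_count > 0, A's early return ignores the zone penalties and yields 100, while B subtracts them and clamps (e.g. 92 for one dead zone), which is the intended scoring since zone penalties should apply regardless of turns. — e.g. on calculate_safety_score([], 1, 0): A returns 100, B returns 92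
import Mathlib
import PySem

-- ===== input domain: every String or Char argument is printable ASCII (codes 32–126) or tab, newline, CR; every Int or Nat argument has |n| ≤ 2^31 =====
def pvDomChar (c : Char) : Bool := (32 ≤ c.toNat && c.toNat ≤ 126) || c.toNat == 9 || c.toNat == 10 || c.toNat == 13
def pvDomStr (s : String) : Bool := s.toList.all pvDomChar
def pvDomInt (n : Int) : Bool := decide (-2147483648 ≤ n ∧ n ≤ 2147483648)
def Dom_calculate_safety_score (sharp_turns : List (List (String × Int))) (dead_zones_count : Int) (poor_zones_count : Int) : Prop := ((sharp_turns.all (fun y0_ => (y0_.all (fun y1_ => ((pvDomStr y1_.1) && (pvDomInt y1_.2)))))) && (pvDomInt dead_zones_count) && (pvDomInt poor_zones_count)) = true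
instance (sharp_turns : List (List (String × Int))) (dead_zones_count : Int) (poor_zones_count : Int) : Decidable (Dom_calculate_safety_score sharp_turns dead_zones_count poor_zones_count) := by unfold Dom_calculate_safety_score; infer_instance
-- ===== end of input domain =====

-- B builds a histogram (dict) of the distinct angles and charges each distinct angle's
-- penalty weight times its multiplicity (objective: alternative); on empty sharp_turns with
-- positive zone penalty A ignores the zones (early return 100) while B applies them — D_ below.

-- ===== PORT A =====
def calculate_safety_score (sharp_turns : List (List (String × Int))) (dead_zones_count : Int) (poor_zones_count : Int) : Int :=
  let base_score : Int := 100
  if sharp_turns = [] then base_score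
  else
    let blind_spots : Int :=
      (sharp_turns.filter (fun t => decide ((PySem.Dict.mk t).getD "angle" 0 > 80))).length
    let sharp_danger : Int :=
      (sharp_turns.filter (fun t => decide (70 ≤ (PySem.Dict.mk t).getD "angle" 0 ∧ (PySem.Dict.mk t).getD "angle" 0 ≤ 80))).length
    let moderate_turns : Int :=
      (sharp_turns.filter (fun t => decide (45 ≤ (PySem.Dict.mk t).getD "angle" 0 ∧ (PySem.Dict.mk t).getD "angle" 0 < 70))).length
    let base_score := base_score - blind_spots * 15
    let base_score := base_score - sharp_danger * 10
    let base_score := base_score - moderate_turns * 5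
    let base_score := base_score - dead_zones_count * 8
    let base_score := base_score - poor_zones_count * 4
    max 0 (min 100 base_score)

-- ===== PORT B =====
def calculate_safety_score_alt (sharp_turns : List (List (String × Int))) (dead_zones_count : Int) (poor_zones_count : Int) : Int :=
  let hist : PySem.Dict Int Int := sharp_turns.foldl (fun h t =>
      let a := (PySem.Dict.mk t).getD "angle" 0
      h.insert a (h.getD a 0 + 1)) PySem.Dict.empty
  let penalty : Int := hist.items.foldl (fun pen an =>
      if an.1 > 80 then pen + 15 * an.2
      else if an.1 ≥ 70 then pen + 10 * an.2
      else if an.1 ≥ 45 then pen + 5 * an.2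
      else pen) 0
  let score := 100 - penalty - 8 * dead_zones_count - 4 * poor_zones_count
  max 0 (min 100 score)

-- ===== PRECONDITION & SPEC =====
-- On empty sharp_turns with 2*dead_zones_count + poor_zones_count > 0, A's early return
-- yields 100 ignoring the zone penalties, while B subtracts them and clamps; B's value is
-- intended since zone penalties should apply regardless of turns.
def D_calculate_safety_score (sharp_turns : List (List (String × Int))) (dead_zones_count : Int) (poor_zones_count : Int) : Prop :=
  sharp_turns = [] ∧ 2 * dead_zones_count + poor_zones_count > 0
instance (sharp_turns : List (List (String × Int))) (dead_zones_count : Int) (poor_zones_count : Int) : Decidable (D_calculate_safety_score sharp_turns dead_zones_count poor_zones_count) := by unfold D_calculate_safety_score; infer_instance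

def Spec_calculate_safety_score (sharp_turns : List (List (String × Int))) (dead_zones_count : Int) (poor_zones_count : Int) (out : Int) : Prop := ¬ D_calculate_safety_score sharp_turns dead_zones_count poor_zones_count → out = calculate_safety_score_alt sharp_turns dead_zones_count poor_zones_count
instance (sharp_turns : List (List (String × Int))) (dead_zones_count : Int) (poor_zones_count : Int) (out : Int) : Decidable (Spec_calculate_safety_score sharp_turns dead_zones_count poor_zones_count out) := by unfold Spec_calculate_safety_score; infer_instance

def pvDiffWitness_calculate_safety_score : (List (List (String × Int))) × Int × Int := ([], 1, 0)
def pvDiffWitnessOut_calculate_safety_score : Int × Int := (100, 92)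

-- ===== CLAIM (what is proved, stated in full; the proofs are below) =====
def Claim_unchanged_calculate_safety_score : Prop := ∀ (sharp_turns : List (List (String × Int))) (dead_zones_count : Int) (poor_zones_count : Int), Dom_calculate_safety_score sharp_turns dead_zones_count poor_zones_count → Spec_calculate_safety_score sharp_turns dead_zones_count poor_zones_count (calculate_safety_score sharp_turns dead_zones_count poor_zones_count)
def Claim_changed_calculate_safety_score : Prop := Dom_calculate_safety_score (pvDiffWitness_calculate_safety_score.1) (pvDiffWitness_calculate_safety_score.2.1) (pvDiffWitness_calculate_safety_score.2.2) ∧ D_calculate_safety_score (pvDiffWitness_calculate_safety_score.1) (pvDiffWitness_calculate_safety_score.2.1) (pvDiffWitness_calculate_safety_score.2.2) ∧ calculate_safety_score (pvDiffWitness_calculate_safety_score.1) (pvDiffWitness_calculate_safety_score.2.1) (pvDiffWitness_calculate_safety_score.2.2) = pvDiffWitnessOut_calculate_safety_score.1 ∧ calculate_safety_score_alt (pvDiffWitness_calculate_safety_score.1) (pvDiffWitness_calculate_safety_score.2.1) (pvDiffWitness_calculate_safety_score.2.2) = pvDiffWitnessOut_calculate_safety_score.2 ∧ pvDiffWitnessOut_calculate_safety_score.1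 ≠ pvDiffWitnessOut_calculate_safety_score.2
def Claim_exact_calculate_safety_score : Prop := ∀ (sharp_turns : List (List (String × Int))) (dead_zones_count : Int) (poor_zones_count : Int), Dom_calculate_safety_score sharp_turns dead_zones_count poor_zones_count → D_calculate_safety_score sharp_turns dead_zones_count poor_zones_count → calculate_safety_score sharp_turns dead_zones_count poor_zones_count ≠ calculate_safety_score_alt sharp_turns dead_zones_count poor_zones_count

-- ===== LEMMAS AND PROOFS =====

-- The penalty weight of a single angle (the if/elif chain of B's second loop).
def pvWeight (a : Int) : Int :=
  if a > 80 then 15 else if a ≥ 70 then 10 else if a ≥ 45 then 5 else 0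

-- B's second loop sums pvWeight an.1 * an.2 over the histogram items.
theorem pen_fold (L : List (Int × Int)) (init : Int) :
    L.foldl (fun pen an =>
      if an.1 > 80 then pen + 15 * an.2
      else if an.1 ≥ 70 then pen + 10 * an.2
      else if an.1 ≥ 45 then pen + 5 * an.2
      else pen) init
    = init + (L.map (fun an => pvWeight an.1 * an.2)).sum := by
  induction L generalizing init with
  | nil => simp
  | cons an rest ih =>
    simp only [List.foldl_cons, List.map_cons, List.sum_cons, ih, pvWeight]
    split_ifs <;> ring

-- Indicator sum over a nodup list containing x.
theorem sum_indicator (D : List Int) (x : Int) (w : Int → Int)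
    (hnd : D.Nodup) (hx : x ∈ D) :
    (D.map (fun k => if k = x then w k else 0)).sum = w x := by
  induction D with
  | nil => cases hx
  | cons d rest ih =>
    simp only [List.map_cons, List.sum_cons]
    rcases List.mem_cons.mp hx with h | h
    · subst h
      rw [if_pos rfl]
      have : (rest.map (fun k => if k = x then w k else 0)).sum = 0 := by
        apply List.sum_eq_zero
        intro n hn
        obtain ⟨k, hk, hkn⟩ := List.mem_map.mp hn
        have : k ≠ x := fun he => (List.nodup_cons.mp hnd).1 (he ▸ hk)
        simp [this] at hkn
        omega
      omega
    · have hne : d ≠ x := fun he => (List.nodup_cons.mp hnd).1 (he ▸ h)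
      rw [if_neg hne, ih (List.nodup_cons.mp hnd).2 h]
      omega

-- Weighted count over any nodup superset of the values equals the plain weighted sum.
theorem wsum (xs : List Int) (D : List Int) (w : Int → Int)
    (hnd : D.Nodup) (hmem : ∀ x, x ∈ xs → x ∈ D) :
    (D.map (fun k => w k * (xs.count k : Int))).sum = (xs.map w).sum := by
  induction xs with
  | nil => simp
  | cons x rest ih =>
    have hx : x ∈ D := hmem x (List.mem_cons_self)
    have hrest : ∀ y, y ∈ rest → y ∈ D := fun y hy => hmem y (List.mem_cons_of_mem _ hy)
    simp only [List.count_cons, List.map_cons, List.sum_cons]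
    have split : (D.map (fun k => w k * ((rest.count k + if (x == k) = true then 1 else 0 : Nat) : Int))).sum
        = (D.map (fun k => w k * (rest.count k : Int))).sum
          + (D.map (fun k => if k = x then w k else 0)).sum := by
      rw [← List.sum_map_add]
      refine congrArg List.sum (List.map_congr_left ?_)
      intro k _
      by_cases h : x = k
      · simp [h]; ring
      · simp [h, Ne.symm h]
    rw [split, ih hrest, sum_indicator D x w hnd hx]
    omega

-- The plain weighted sum equals A's three weighted filter counts.
theorem wsum_counts (xs : List Int) :
    (xs.map pvWeight).sum
    = ((xs.filter (fun a => decide (a > 80))).length : Int) * 15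
      + ((xs.filter (fun a => decide (70 ≤ a ∧ a ≤ 80))).length : Int) * 10
      + ((xs.filter (fun a => decide (45 ≤ a ∧ a < 70))).length : Int) * 5 := by
  induction xs with
  | nil => simp
  | cons x rest ih =>
    simp only [List.map_cons, List.sum_cons, List.filter_cons, decide_eq_true_eq, pvWeight]
    split_ifs <;> (try simp only [List.length_cons]) <;> push_cast <;> omega

-- B's whole angle pipeline (histogram then weighted pass) in closed form.
theorem alt_penalty (st : List (List (String × Int))) :
    (((st.foldl (fun h t =>
        let a := (PySem.Dict.mk t).getD "angle" 0
        h.insert a (h.getD a 0 + 1)) (PySem.Dict.empty : PySem.Dict Int Int)).items).foldl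
      (fun pen an =>
        if an.1 > 80 then pen + 15 * an.2
        else if an.1 ≥ 70 then pen + 10 * an.2
        else if an.1 ≥ 45 then pen + 5 * an.2
        else pen) 0)
    = ((st.map (fun t => (PySem.Dict.mk t).getD "angle" 0)).map pvWeight).sum := by
  set f : List (String × Int) → Int := fun t => (PySem.Dict.mk t).getD "angle" 0 with hf
  have h1 : st.foldl (fun h t => h.insert (f t) (h.getD (f t) 0 + 1)) (PySem.Dict.empty : PySem.Dict Int Int)
      = PySem.Dict.counter (st.map f) := by
    rw [← PySem.Dict.foldl_insert_getD_add_one_eq_counter, List.foldl_map]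
  show ((st.foldl (fun h t => h.insert (f t) (h.getD (f t) 0 + 1)) (PySem.Dict.empty : PySem.Dict Int Int)).items).foldl _ 0 = _
  rw [h1, pen_fold, PySem.Dict.items_counter]
  set xs := st.map f with hxs
  rw [← PySem.List.dedup_eq_ofList, List.map_map]
  have : ((PySem.List.dedup xs).map ((fun an : Int × Int => pvWeight an.1 * an.2) ∘ fun k => (k, (xs.count k : Int)))).sum
      = ((PySem.List.dedup xs).map (fun k => pvWeight k * (xs.count k : Int))).sum := rfl
  rw [this, wsum xs (PySem.List.dedup xs) pvWeight (PySem.List.nodup_dedup xs)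
      (fun x hx => (PySem.List.mem_dedup xs x).mpr hx)]
  omega

theorem calculate_safety_score_spec : Claim_unchanged_calculate_safety_score := by
  intro st d p _
  unfold Spec_calculate_safety_score
  intro hnd
  unfold calculate_safety_score calculate_safety_score_alt
  simp only
  rw [alt_penalty st, wsum_counts]
  by_cases h : st = []
  · subst h
    rw [if_pos rfl]
    simp only [List.map_nil, List.filter_nil, List.length_nil, Int.natCast_zero]
    unfold D_calculate_safety_score at hnd
    have hz : ¬ (2 * d + p > 0) := fun hp => hnd ⟨rfl, hp⟩
    omega
  · rw [if_neg h]
    have e1 : (st.filter (fun t => decide ((PySem.Dict.mk t).getD "angle" 0 > 80))).length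
        = ((st.map (fun t => (PySem.Dict.mk t).getD "angle" 0)).filter (fun a => decide (a > 80))).length := by
      rw [List.filter_map, List.length_map]; rfl
    have e2 : (st.filter (fun t => decide (70 ≤ (PySem.Dict.mk t).getD "angle" 0 ∧ (PySem.Dict.mk t).getD "angle" 0 ≤ 80))).length
        = ((st.map (fun t => (PySem.Dict.mk t).getD "angle" 0)).filter (fun a => decide (70 ≤ a ∧ a ≤ 80))).length := by
      rw [List.filter_map, List.length_map]; rfl
    have e3 : (st.filter (fun t => decide (45 ≤ (PySem.Dict.mk t).getD "angle" 0 ∧ (PySem.Dict.mk t).getD "angle" 0 < 70))).length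
        = ((st.map (fun t => (PySem.Dict.mk t).getD "angle" 0)).filter (fun a => decide (45 ≤ a ∧ a < 70))).length := by
      rw [List.filter_map, List.length_map]; rfl
    rw [e1, e2, e3]
    omega

theorem calculate_safety_score_changed : Claim_changed_calculate_safety_score := by
  unfold Claim_changed_calculate_safety_score; decide

theorem calculate_safety_score_tight : Claim_exact_calculate_safety_score := by
  intro st d p _ hd
  obtain ⟨hst, hpos⟩ := hd
  subst hst
  unfold calculate_safety_score calculate_safety_score_alt
  rw [if_pos rfl]
  simp only [List.foldl_nil, PySem.Dict.empty]
  omega
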